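-- pv_equiv track=rewrite | github.com/jleinenbach/GoogleFindMy-HA | custom_components/googlefindmy/config_flow.py | _normalize_feature_list
-- ===== SOURCE A (Python) =====
-- from collections.abc import Iterable as CollIterable
--
-- def _normalize_feature_list(features: CollIterable[str]) -> list[str]:
--     """Return a sorted list of unique, lower-cased feature identifiers."""
--
--     normalized: list[str] = []
--     for feature in features:
--         if not isinstance(feature, str):
--             continue
--         candidate = feature.strip().lower()
--         if candidate:
--             normalized.append(candidate)
--     ordered = list(dict.fromkeys(normalized))
--     return sorted(ordered)
-- ===== SOURCE B (Python) =====
-- def _normalize_feature_list(features):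
--     """Return a sorted list of unique, lower-cased feature identifiers."""
--     normalized = []
--     for feature in features:
--         if not isinstance(feature, str):
--             continue
--         candidate = feature.strip().lower()
--         if candidate:
--             normalized.append(candidate)
--     normalized.sort()
--     out = []
--     prev = None
--     for candidate in normalized:
--         if candidate != prev:
--             out.append(candidate)
--             prev = candidate
--     return out
-- ===== Notes on version B (the rewrite author's own statement) =====
-- stated objective: alternative
-- what changed: Dedup by a single adjacency scan after sorting (tracking the previously emitted element) instead of hashing first occurrences with dict.fromkeys and sorting afterwards.
import Mathlib
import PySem

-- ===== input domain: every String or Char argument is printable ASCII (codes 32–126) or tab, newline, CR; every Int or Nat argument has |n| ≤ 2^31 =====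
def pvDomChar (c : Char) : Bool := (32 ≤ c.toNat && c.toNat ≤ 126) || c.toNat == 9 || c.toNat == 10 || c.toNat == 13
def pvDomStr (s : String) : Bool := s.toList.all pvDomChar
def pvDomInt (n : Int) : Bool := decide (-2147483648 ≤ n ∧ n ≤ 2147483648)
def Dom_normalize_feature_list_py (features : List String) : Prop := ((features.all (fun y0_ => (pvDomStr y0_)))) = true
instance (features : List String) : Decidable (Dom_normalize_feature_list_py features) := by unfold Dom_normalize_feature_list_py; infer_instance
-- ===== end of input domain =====

-- B replaces A's dict.fromkeys dedup-then-sort with sort-then-adjacent-dedup (one linear scan tracking the previous element); alternative decomposition, same asymptotic cost.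

-- ===== PORT A =====
-- for-loop building `normalized` (isinstance(feature, str) is always true: the argument is a list of strings)
def normalize_feature_list_py (features : List String) : List String :=
  let normalized := features.foldl (fun acc feature =>
    let candidate := PySem.Str.lower (PySem.Str.strip feature)
    if candidate ≠ "" then acc ++ [candidate] else acc) []
  let ordered := PySem.List.dedup normalized
  PySem.List.sorted ordered (fun x => x) false

-- ===== PORT B =====
-- the adjacency-dedup loop: `prev` is the previously appended element (None before the first)
def pvAdjDedup : Option String → List String → List String
  | _, [] => []
  | prev, c :: t => if some c ≠ prev then c :: pvAdjDedup (some c) t else pvAdjDedup (some c) t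

def normalize_feature_list_py_alt (features : List String) : List String :=
  let normalized := features.foldl (fun acc feature =>
    let candidate := PySem.Str.lower (PySem.Str.strip feature)
    if candidate ≠ "" then acc ++ [candidate] else acc) []
  pvAdjDedup none (PySem.List.sorted normalized (fun x => x) false)

-- ===== PRECONDITION & SPEC =====
def Spec_normalize_feature_list_py (features : List String) (out : List String) : Prop := out = normalize_feature_list_py_alt features
instance (features : List String) (out : List String) : Decidable (Spec_normalize_feature_list_py features out) := by unfold Spec_normalize_feature_list_py; infer_instance

-- ===== CLAIM (what is proved, stated in full; the proofs are below) =====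
def Claim_equal_normalize_feature_list_py : Prop := ∀ (features : List String), Dom_normalize_feature_list_py features → Spec_normalize_feature_list_py features (normalize_feature_list_py features)

-- ===== LEMMAS AND PROOFS =====

-- membership in the adjacency-dedup of a ≤-sorted list, for a `prev` bounding the list from below
lemma pvAdjDedup_mem (L : List String) (prev : Option String)
    (hL : L.Pairwise (· ≤ ·)) (hprev : ∀ p, prev = some p → ∀ x ∈ L, p ≤ x) :
    ∀ x, x ∈ pvAdjDedup prev L ↔ (x ∈ L ∧ some x ≠ prev) := by
  induction L generalizing prev with
  | nil => simp [pvAdjDedup]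
  | cons c t ih =>
    intro x
    have ht : t.Pairwise (· ≤ ·) := hL.tail
    have hct : ∀ y ∈ t, c ≤ y := fun y hy => (List.pairwise_cons.mp hL).1 y hy
    have ih' := ih (some c) ht (by rintro p rfl1 x hx; cases Option.some.injEq .. ▸ rfl1; exact hct x hx)
    by_cases hc : some c = prev
    · subst hc
      rw [show pvAdjDedup (some c) (c :: t) = pvAdjDedup (some c) t from by
        simp [pvAdjDedup]]
      rw [ih' x]
      simp only [List.mem_cons, ne_eq, Option.some.injEq]
      tauto
    · simp only [pvAdjDedup, if_pos hc, List.mem_cons]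
      rw [ih' x]
      constructor
      · rintro (rfl | ⟨hx, hne⟩)
        · exact ⟨Or.inl rfl, hc⟩
        · refine ⟨Or.inr hx, ?_⟩
          rcases hp : prev with _ | p
          · simp
          · have hpc : p ≤ c := hprev p hp c (List.mem_cons_self)
            have hpx : c ≤ x := hct x hx
            intro hxp
            have hxe : p = x := by simpa [hp] using hxp.symm
            subst hxe
            exact hc (by rw [hp, le_antisymm hpc hpx])
      · rintro ⟨rfl | hx, hne⟩
        · exact Or.inl rfl
        · by_cases hxc : x = c
          · exact Or.inl hxc
          · exact Or.inr ⟨hx, by simpa using hxc⟩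

lemma pvAdjDedup_pairwise (L : List String) (prev : Option String)
    (hL : L.Pairwise (· ≤ ·)) :
    (pvAdjDedup prev L).Pairwise (· < ·) := by
  induction L generalizing prev with
  | nil => simp [pvAdjDedup]
  | cons c t ih =>
    have ht : t.Pairwise (· ≤ ·) := hL.tail
    have hct : ∀ y ∈ t, c ≤ y := fun y hy => (List.pairwise_cons.mp hL).1 y hy
    by_cases hc : some c = prev
    · subst hc
      simpa [pvAdjDedup] using ih (some c) ht
    · simp only [pvAdjDedup, if_pos hc]
      refine List.pairwise_cons.mpr ⟨?_, ih (some c) ht⟩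
      intro y hy
      have := (pvAdjDedup_mem t (some c) ht
        (by rintro p hp x hx; cases Option.some.injEq .. ▸ hp; exact hct x hx) y).mp hy
      exact lt_of_le_of_ne (hct y this.1) (fun h => this.2 (by rw [h]))

-- the core fact: sorting the deduped list equals adjacency-deduping the sorted list
lemma pv_sorted_dedup_eq_adj (raw : List String) :
    PySem.List.sorted (PySem.List.dedup raw) (fun x => x) false
      = pvAdjDedup none (PySem.List.sorted raw (fun x => x) false) := by
  set s := PySem.List.sorted raw (fun x => x) false with hs
  have hsp : s.Pairwise (· ≤ ·) := by
    simpa using PySem.List.sorted_pairwise raw (fun x => x)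
  have hmem : ∀ x, x ∈ pvAdjDedup none s ↔ x ∈ raw := by
    intro x
    rw [pvAdjDedup_mem s none hsp (by rintro p ⟨⟩), hs]
    simp [PySem.List.mem_sorted]
  have hlt : (pvAdjDedup none s).Pairwise (· < ·) := pvAdjDedup_pairwise s none hsp
  have hperm : (pvAdjDedup none s).Perm (PySem.List.dedup raw) := by
    refine (List.perm_ext_iff_of_nodup hlt.nodup (PySem.List.nodup_dedup raw)).mpr ?_
    intro a
    rw [hmem a, PySem.List.mem_dedup]
  exact PySem.List.sorted_eq_of_perm_of_pairwise_lt _ _ _ hperm hlt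

-- ===== VERDICT (by name: the statement is the Claim_ definition above) =====
theorem normalize_feature_list_py_spec : Claim_equal_normalize_feature_list_py := by
  intro features _
  show _ = _
  unfold normalize_feature_list_py normalize_feature_list_py_alt
  exact pv_sorted_dedup_eq_adj _
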